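-- pv_equiv track=rewrite | github.com/lettidude/LiveActionAOV | src/live_action_aov/gui/pass_catalog.py | expand_models
-- ===== SOURCE A (Python) =====
-- from dataclasses import dataclass
--
-- @dataclass(frozen=True)
-- class ModelEntry:
--     key: str  # stored in ShotState.enabled_models — stable identifier
--     label: str  # rendered in the inspector
--     license_tag: str  # short SPDX-ish string shown next to the label
--     commercial: bool  # gates the non-commercial consent dialog
--     expansion: tuple[str, ...]  # concrete plugin names fed to the executor
--
-- PASS_CATALOG: dict[str, list[ModelEntry]] = {
--     "Flow": [
--         ModelEntry("flow", "RAFT", "Apache-2.0", True, ("flow",)),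
--     ],
--     "Depth": [
--         ModelEntry(
--             "depth_anything_v2",
--             "Depth Anything v2",
--             "Apache-2.0",
--             True,
--             ("depth_anything_v2",),
--         ),
--         ModelEntry(
--             "video_depth_anything",
--             "Video Depth Anything",
--             "Apache-2.0",
--             True,
--             ("video_depth_anything",),
--         ),
--         ModelEntry(
--             "depthcrafter",
--             "DepthCrafter",
--             "CC-BY-NC-4.0",
--             False,
--             ("depthcrafter",),
--         ),
--         ModelEntry(
--             "depthpro",
--             "DepthPro",
--             "CC-BY-NC-4.0",
--             False,
--             ("depthpro",),
--         ),
--     ],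
--     "Normals": [
--         ModelEntry("dsine", "DSINE", "MIT", True, ("dsine",)),
--         ModelEntry(
--             "normalcrafter",
--             "NormalCrafter",
--             "CC-BY-NC-4.0",
--             False,
--             ("normalcrafter",),
--         ),
--     ],
--     "Matte": [
--         # Matte combos are virtual entries — one checkbox in the UX
--         # but two plugins on the executor side. Keeps the mental
--         # model simple ("pick a matte backend") and leaves detector
--         # + refiner pairing to the catalog rather than the user.
--         ModelEntry(
--             "sam3_rvm",
--             "SAM3 + RVM",
--             "SAM-License / MIT",
--             True,
--             ("sam3_matte", "rvm_refiner"),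
--         ),
--         ModelEntry(
--             "sam3_matanyone2",
--             "SAM3 + MatAnyone2",
--             "CC-BY-NC-4.0",
--             False,
--             ("sam3_matte", "matanyone2"),
--         ),
--     ],
-- }
--
-- def find_entry(key: str) -> ModelEntry | None:
--     for entries in PASS_CATALOG.values():
--         for e in entries:
--             if e.key == key:
--                 return e
--     return None
--
-- def expand_models(keys: list[str]) -> list[str]:
--     """Turn a list of catalog keys into the concrete plugin-name
--     sequence the executor receives. Duplicates collapsed in order (a
--     user who enabled both `sam3_rvm` and some other SAM3-based model
--     doesn't run SAM3 twice).
--     """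
--     out: list[str] = []
--     seen: set[str] = set()
--     for k in keys:
--         entry = find_entry(k)
--         targets = entry.expansion if entry else (k,)
--         for t in targets:
--             if t not in seen:
--                 out.append(t)
--                 seen.add(t)
--     return out
-- ===== SOURCE B (Python) =====
-- # key -> expansion index, the per-entry (key, expansion) pairs of
-- # PASS_CATALOG in catalog order, built once.
-- _EXPANSION = {
--     "flow": ("flow",),
--     "depth_anything_v2": ("depth_anything_v2",),
--     "video_depth_anything": ("video_depth_anything",),
--     "depthcrafter": ("depthcrafter",),
--     "depthpro": ("depthpro",),
--     "dsine": ("dsine",),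
--     "normalcrafter": ("normalcrafter",),
--     "sam3_rvm": ("sam3_matte", "rvm_refiner"),
--     "sam3_matanyone2": ("sam3_matte", "matanyone2"),
-- }
--
-- def _first_occurrences(xs):
--     """Order-preserving dedup by recursion: keep the head and delete
--     every later copy of it from the tail before recursing.  No seen-set
--     or dict is maintained; duplicates are removed downstream instead of
--     skipped on arrival."""
--     if not xs:
--         return []
--     h = xs[0]
--     return [h] + _first_occurrences([x for x in xs[1:] if x != h])
--
-- def expand_models(keys):
--     flat = []
--     for k in keys:
--         flat.extend(_EXPANSION.get(k, (k,)))
--     return _first_occurrences(flat)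
-- ===== Notes on version B (the rewrite author's own statement) =====
-- stated objective: alternative
-- what changed: A's single fused loop (per-key catalog scan, explicit seen-set gating appends) is replaced by a staged algorithm: flatten all keys to targets via a key->expansion index built once, then deduplicate by head-and-filter recursion that deletes later copies of each kept element from the remaining tail instead of maintaining any seen structure.
import Mathlib
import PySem

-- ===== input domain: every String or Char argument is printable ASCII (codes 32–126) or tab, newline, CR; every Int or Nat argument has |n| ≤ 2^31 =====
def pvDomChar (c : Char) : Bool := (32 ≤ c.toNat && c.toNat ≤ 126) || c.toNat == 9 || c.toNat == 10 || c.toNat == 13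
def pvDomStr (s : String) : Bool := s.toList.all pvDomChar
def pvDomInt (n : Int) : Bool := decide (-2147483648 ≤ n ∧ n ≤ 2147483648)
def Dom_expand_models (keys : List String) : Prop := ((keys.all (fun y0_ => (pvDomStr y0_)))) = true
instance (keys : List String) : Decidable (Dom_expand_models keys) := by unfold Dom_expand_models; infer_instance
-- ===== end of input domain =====

-- B replaces A's fused scan-and-dedup loop (seen-set gating appends) by a staged algorithm:
-- flatten keys to targets via an index built once, then head-and-filter recursive dedup
-- that deletes later duplicates from the tail; objective: alternative.

-- ===== PORT A =====
structure ModelEntry where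
  key : String
  label : String
  license_tag : String
  commercial : Bool
  expansion : List String
deriving DecidableEq, Repr

def PASS_CATALOG : List (String × List ModelEntry) :=
  [ ("Flow", [⟨"flow", "RAFT", "Apache-2.0", true, ["flow"]⟩]),
    ("Depth",
      [⟨"depth_anything_v2", "Depth Anything v2", "Apache-2.0", true, ["depth_anything_v2"]⟩,
       ⟨"video_depth_anything", "Video Depth Anything", "Apache-2.0", true, ["video_depth_anything"]⟩,
       ⟨"depthcrafter", "DepthCrafter", "CC-BY-NC-4.0", false, ["depthcrafter"]⟩,
       ⟨"depthpro", "DepthPro", "CC-BY-NC-4.0", false, ["depthpro"]⟩]),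
    ("Normals",
      [⟨"dsine", "DSINE", "MIT", true, ["dsine"]⟩,
       ⟨"normalcrafter", "NormalCrafter", "CC-BY-NC-4.0", false, ["normalcrafter"]⟩]),
    ("Matte",
      [⟨"sam3_rvm", "SAM3 + RVM", "SAM-License / MIT", true, ["sam3_matte", "rvm_refiner"]⟩,
       ⟨"sam3_matanyone2", "SAM3 + MatAnyone2", "CC-BY-NC-4.0", false, ["sam3_matte", "matanyone2"]⟩]) ]

-- inner 'for e in entries: if e.key == key: return e' (early return as recursion)
def findInEntries (key : String) : List ModelEntry → Option ModelEntry
  | [] => none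
  | e :: es => if e.key == key then some e else findInEntries key es

-- 'for entries in PASS_CATALOG.values(): …' over the groups, early return threaded
def findInGroups (key : String) : List (List ModelEntry) → Option ModelEntry
  | [] => none
  | g :: gs =>
    match findInEntries key g with
    | some e => some e
    | none => findInGroups key gs

def find_entry (key : String) : Option ModelEntry :=
  findInGroups key (PASS_CATALOG.map Prod.snd)

def expand_models (keys : List String) : List String :=
  -- out, seen accumulated over keys; inner loop over targets
  let st := keys.foldl
    (fun (st : List String × PySem.Set String) k =>
      let entry := find_entry k
      let targets := match entry with | some e => e.expansion | none => [k]
      targets.foldl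
        (fun st t =>
          if PySem.Set.contains st.2 t then st
          else (st.1 ++ [t], PySem.Set.add st.2 t)) st)
    ([], PySem.Set.empty)
  st.1

-- ===== PORT B =====
-- the key→expansion dict, built once
def EXPANSION_INDEX : PySem.Dict String (List String) :=
  (PySem.Dict.empty
    |>.insert "flow" ["flow"]
    |>.insert "depth_anything_v2" ["depth_anything_v2"]
    |>.insert "video_depth_anything" ["video_depth_anything"]
    |>.insert "depthcrafter" ["depthcrafter"]
    |>.insert "depthpro" ["depthpro"]
    |>.insert "dsine" ["dsine"]
    |>.insert "normalcrafter" ["normalcrafter"]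
    |>.insert "sam3_rvm" ["sam3_matte", "rvm_refiner"]
    |>.insert "sam3_matanyone2" ["sam3_matte", "matanyone2"])

-- head-and-filter dedup: keep the head, delete its later copies from the tail, recurse
def firstOccurrences : List String → List String
  | [] => []
  | h :: t => h :: firstOccurrences (t.filter (fun x => x ≠ h))
termination_by xs => xs.length
decreasing_by simpa using le_trans (List.length_filter_le _ _) (le_of_eq (List.length_attach))

def expand_models_alt (keys : List String) : List String :=
  -- 'flat = []; for k in keys: flat.extend(_EXPANSION.get(k, (k,)))'
  let flat := keys.foldl (fun acc k => acc ++ (EXPANSION_INDEX.get? k).getD [k]) []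
  firstOccurrences flat

-- ===== PRECONDITION & SPEC =====
def Spec_expand_models (keys : List String) (out : List String) : Prop := out = expand_models_alt keys
instance (keys : List String) (out : List String) : Decidable (Spec_expand_models keys out) := by unfold Spec_expand_models; infer_instance

-- ===== CLAIM (what is proved, stated in full; the proofs are below) =====
def Claim_equal_expand_models : Prop := ∀ (keys : List String), Dom_expand_models keys → Spec_expand_models keys (expand_models keys)

-- ===== LEMMAS AND PROOFS =====

-- the two lookups agree: A's catalog scan's targets = B's index lookup
lemma targets_eq (k : String) :
    (match find_entry k with | some e => e.expansion | none => [k])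
      = (EXPANSION_INDEX.get? k).getD [k] := by
  by_cases h1 : k = "flow"
  · subst h1; rfl
  by_cases h2 : k = "depth_anything_v2"
  · subst h2; rfl
  by_cases h3 : k = "video_depth_anything"
  · subst h3; rfl
  by_cases h4 : k = "depthcrafter"
  · subst h4; rfl
  by_cases h5 : k = "depthpro"
  · subst h5; rfl
  by_cases h6 : k = "dsine"
  · subst h6; rfl
  by_cases h7 : k = "normalcrafter"
  · subst h7; rfl
  by_cases h8 : k = "sam3_rvm"
  · subst h8; rfl
  by_cases h9 : k = "sam3_matanyone2"
  · subst h9; rfl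
  simp [find_entry, PASS_CATALOG, findInGroups, findInEntries, EXPANSION_INDEX,
    PySem.Dict.get?_insert, PySem.Dict.get?_empty, h1, Ne.symm h1, h2, Ne.symm h2, h3, Ne.symm h3, h4, Ne.symm h4, h5, Ne.symm h5, h6, Ne.symm h6, h7, Ne.symm h7, h8, Ne.symm h8, h9, Ne.symm h9]

-- A's inner loop from a state whose out-list and seen-set coincide performs Set.update on both
lemma inner_fold (ts : List String) (out : List String) :
    ts.foldl (fun (st : List String × PySem.Set String) t =>
        if PySem.Set.contains st.2 t then st
        else (st.1 ++ [t], PySem.Set.add st.2 t)) (out, out)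
      = (PySem.Set.update out ts, PySem.Set.update out ts) := by
  induction ts generalizing out with
  | nil => rfl
  | cons t ts ih =>
    simp only [PySem.Set.update, List.foldl] at ih ⊢
    by_cases h : t ∈ out
    · have hc : PySem.Set.contains out t = true := by simp [h]
      have ha : PySem.Set.add out t = out := by simp [PySem.Set.add, h]
      simp only [hc, if_true, ha]
      exact ih out
    · have hc : PySem.Set.contains out t = false := by simp [h]
      have ha : PySem.Set.add out t = out ++ [t] := by simp [PySem.Set.add, h]
      simp only [hc, Bool.false_eq_true, if_false, ha]
      exact ih (out ++ [t])

-- A's whole fold is Set.update of the flattened target list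
lemma outer_fold (ks : List String) (out : List String) :
    (ks.foldl (fun (st : List String × PySem.Set String) k =>
        (match find_entry k with | some e => e.expansion | none => [k]).foldl
          (fun st t =>
            if PySem.Set.contains st.2 t then st
            else (st.1 ++ [t], PySem.Set.add st.2 t)) st) (out, out))
      = (PySem.Set.update out (ks.flatMap (fun k => (EXPANSION_INDEX.get? k).getD [k])),
         PySem.Set.update out (ks.flatMap (fun k => (EXPANSION_INDEX.get? k).getD [k]))) := by
  induction ks generalizing out with
  | nil => rfl
  | cons k ks ih =>
    simp only [List.foldl, List.flatMap_cons]
    rw [targets_eq, inner_fold, ih]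
    simp only [PySem.Set.update, List.foldl_append]

-- seen-set accumulation equals head-and-filter dedup of the not-yet-seen elements
lemma update_eq_firstOccurrences (xs acc : List String) (hnd : acc.Nodup) :
    PySem.Set.update acc xs = acc ++ firstOccurrences (xs.filter (fun x => x ∉ acc)) := by
  induction xs generalizing acc with
  | nil => simp [PySem.Set.update, firstOccurrences]
  | cons x t ih =>
    by_cases hx : x ∈ acc
    · have : PySem.Set.update acc (x :: t) = PySem.Set.update acc t := by
        simp [PySem.Set.update, PySem.Set.add, hx]
      rw [this, ih acc hnd]
      simp [hx]
    · have hstep : PySem.Set.update acc (x :: t) = PySem.Set.update (acc ++ [x]) t := by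
        simp [PySem.Set.update, PySem.Set.add, hx]
      have hnd' : (acc ++ [x]).Nodup :=
        hnd.append (List.nodup_singleton x) (by simpa [List.disjoint_singleton] using hx)
      rw [hstep, ih (acc ++ [x]) hnd']
      simp only [hx, not_false_eq_true, decide_true, List.filter_cons_of_pos,
        List.append_assoc, List.singleton_append]
      rw [firstOccurrences, List.filter_filter]
      congr 2
      refine congrArg firstOccurrences (List.filter_congr ?_)
      intro a _
      by_cases hax : a = x <;> by_cases haa : a ∈ acc <;> simp [hax, haa]

-- ===== VERDICT (by name: the statement is the Claim_ definition above) =====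
theorem expand_models_spec : Claim_equal_expand_models := by
  intro keys _
  unfold Spec_expand_models expand_models expand_models_alt
  show (keys.foldl (fun (st : List String × PySem.Set String) k =>
      (match find_entry k with | some e => e.expansion | none => [k]).foldl
        (fun st t =>
          if PySem.Set.contains st.2 t then st
          else (st.1 ++ [t], PySem.Set.add st.2 t)) st) (([] : List String), ([] : List String))).1
    = firstOccurrences (keys.foldl (fun acc k => acc ++ (EXPANSION_INDEX.get? k).getD [k]) [])
  rw [outer_fold, PySem.List.foldl_append_eq_flatMap]
  simp only [List.nil_append]
  rw [update_eq_firstOccurrences _ [] List.nodup_nil]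
  simp
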